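-- pv_equiv track=rewrite | github.com/andrestor94/web_comparativas | web_comparativas/pliegos_rp.py | _build_validation
-- ===== SOURCE A (Python) =====
-- from typing import Any
--
-- def _build_validation(entries: list[dict[str, Any]]) -> dict[str, Any]:
--     counts = {
--         "COMPLETO": 0,
--         "AMBIGUO": 0,
--         "VALIDACION_MANUAL": 0,
--         "FALTANTE_REAL": 0,
--     }
--     for entry in entries:
--         counts[entry["coverage_status"]] = counts.get(entry["coverage_status"], 0) + 1
--     total = len(entries)
--     complete_pct = int(round((counts["COMPLETO"] / total) * 100)) if total else 0
--     return {
--         "total_campos_rp": total,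
--         "completos": counts["COMPLETO"],
--         "ambiguos": counts["AMBIGUO"],
--         "requieren_validacion_manual": counts["VALIDACION_MANUAL"],
--         "faltantes_reales": counts["FALTANTE_REAL"],
--         "porcentaje_completitud": complete_pct,
--     }
-- ===== SOURCE B (Python) =====
-- def _build_validation(entries):
--     # sort the statuses, then tally them by scanning maximal runs of equal
--     # consecutive values (sort-then-group instead of a hash-map tally)
--     statuses = sorted(entry["coverage_status"] for entry in entries)
--     total = len(statuses)
--     tally = {}
--     i = 0
--     while i < total:
--         j = i
--         while j < total and statuses[j] == statuses[i]:
--             j += 1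
--         tally[statuses[i]] = j - i
--         i = j
--     completos = tally.get("COMPLETO", 0)
--     complete_pct = int(round((completos / total) * 100)) if total else 0
--     return {
--         "total_campos_rp": total,
--         "completos": completos,
--         "ambiguos": tally.get("AMBIGUO", 0),
--         "requieren_validacion_manual": tally.get("VALIDACION_MANUAL", 0),
--         "faltantes_reales": tally.get("FALTANTE_REAL", 0),
--         "porcentaje_completitud": complete_pct,
--     }
-- ===== Notes on version B (the rewrite author's own statement) =====
-- stated objective: alternative
-- what changed: Replaces A's hash-map tally (a dict seeded with four keys, incremented per element) by sort-then-group: the statuses are sorted and a two-pointer scan over maximal runs of equal consecutive values records each run's length once.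
import Mathlib
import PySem

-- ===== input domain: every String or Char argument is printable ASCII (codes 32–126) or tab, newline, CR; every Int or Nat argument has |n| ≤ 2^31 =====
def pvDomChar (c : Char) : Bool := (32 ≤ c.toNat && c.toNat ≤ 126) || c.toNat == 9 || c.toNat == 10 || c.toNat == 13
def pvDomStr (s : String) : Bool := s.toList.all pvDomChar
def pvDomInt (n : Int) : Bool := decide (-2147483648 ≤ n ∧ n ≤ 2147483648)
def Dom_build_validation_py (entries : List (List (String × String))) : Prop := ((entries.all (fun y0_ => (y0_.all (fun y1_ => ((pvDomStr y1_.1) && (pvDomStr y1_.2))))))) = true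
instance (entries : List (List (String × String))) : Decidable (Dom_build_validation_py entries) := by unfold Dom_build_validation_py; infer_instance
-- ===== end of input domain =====

-- B replaces A's hash-map tally by sort-then-group: sort the statuses, then scan maximal runs of equal consecutive values (alternative algorithm, O(n log n) vs O(n)).


-- ===== PORT A =====
-- shared helper: entry["coverage_status"] (first-match dict lookup; none = KeyError, excluded by Pre_)
def pvStatus (e : List (String × String)) : Option String :=
  (PySem.Dict.mk e).get? "coverage_status"

-- shared helper: number of bits of x (x.bit_length()), fuel-driven
def pvBLgo : Nat → Nat → Nat
  | 0, _ => 0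
  | fuel + 1, v => if v = 0 then 0 else pvBLgo fuel (v / 2) + 1

def pvBL (x : Nat) : Nat := pvBLgo x x

-- shared helper: round-half-to-even of a / b (b > 0)
def pvRheDiv (a b : Nat) : Nat :=
  let q := a / b
  let r := a % b
  if 2 * r < b then q else if 2 * r > b then q + 1
  else if q % 2 = 0 then q else q + 1

-- shared helper: exact value of Python's  int(round((c / t) * 100))  for 0 ≤ c ≤ t, 0 < t,
-- emulating IEEE-754 double division c/t and multiplication by 100 (round-to-nearest, ties-to-even)
def pvPct (ci ti : Int) : Int :=
  let c := ci.toNat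
  let t := ti.toNat
  if c = 0 then 0 else
  let s0 := 52 + pvBL t - pvBL c
  let s := if c * 2 ^ s0 < 2 ^ 52 * t then s0 + 1 else s0
  let m := pvRheDiv (c * 2 ^ s) t          -- c/t as double = m * 2^(-s)
  let p := m * 100
  let k := pvBL p - 53
  let y := pvRheDiv p (2 ^ k)              -- (c/t)*100 as double = y * 2^(k-s)
  if s ≤ k then ((y * 2 ^ (k - s) : Nat) : Int) else ((pvRheDiv y (2 ^ (s - k)) : Nat) : Int)

def pvCountsInit : PySem.Dict String Int :=
  ((((PySem.Dict.empty.insert "COMPLETO" 0).insert "AMBIGUO" 0).insert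
      "VALIDACION_MANUAL" 0).insert "FALTANTE_REAL" 0)

def build_validation_py (entries : List (List (String × String))) : List (String × Int) :=
  let counts := entries.foldl (fun d e =>
      match pvStatus e with
      | some s => d.insert s (d.getD s 0 + 1)   -- counts[k] = counts.get(k, 0) + 1
      | none => d) pvCountsInit                  -- KeyError: outside Pre_
  let total : Int := entries.length
  let completePct : Int :=
    if entries.length = 0 then 0 else pvPct (counts.getD "COMPLETO" 0) total
  [("total_campos_rp", total),
   ("completos", counts.getD "COMPLETO" 0),
   ("ambiguos", counts.getD "AMBIGUO" 0),
   ("requieren_validacion_manual", counts.getD "VALIDACION_MANUAL" 0),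
   ("faltantes_reales", counts.getD "FALTANTE_REAL" 0),
   ("porcentaje_completitud", completePct)]

-- ===== PORT B =====
-- B's inner while loop: one maximal run of values equal to x is consumed (takeWhile/dropWhile
-- transcribe the index pair i..j), its length is written to the tally, and the scan resumes at j.
def pvGroupTally (l : List String) (d : PySem.Dict String Int) : PySem.Dict String Int :=
  match l with
  | [] => d
  | x :: xs =>
      let run := xs.takeWhile (fun y => y == x)
      let rest := xs.dropWhile (fun y => y == x)
      pvGroupTally rest (d.insert x ((run.length : Int) + 1))
termination_by l.length
decreasing_by
  simpa using Nat.lt_succ_of_le (List.length_dropWhile_le _ _)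

def build_validation_py_alt (entries : List (List (String × String))) : List (String × Int) :=
  -- statuses = sorted(entry["coverage_status"] for entry in entries); filterMap: a missing key is a
  -- KeyError in Python, outside Pre_ (A's port skips such entries likewise)
  let statuses := PySem.List.sorted (entries.filterMap pvStatus) (fun x => x) false
  let total : Int := statuses.length
  let tally := pvGroupTally statuses PySem.Dict.empty
  let completos := tally.getD "COMPLETO" 0
  let completePct : Int := if statuses.length = 0 then 0 else pvPct completos total
  [("total_campos_rp", total),
   ("completos", completos),
   ("ambiguos", tally.getD "AMBIGUO" 0),
   ("requieren_validacion_manual", tally.getD "VALIDACION_MANUAL" 0),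
   ("faltantes_reales", tally.getD "FALTANTE_REAL" 0),
   ("porcentaje_completitud", completePct)]

-- ===== PRECONDITION & SPEC =====
-- Pre_ excludes entries lacking the key "coverage_status": Python A (and B) raise KeyError there.
def Pre_build_validation_py (entries : List (List (String × String))) : Prop :=
  (entries.all (fun e => e.any (fun p => p.1 == "coverage_status"))) = true
instance (entries : List (List (String × String))) : Decidable (Pre_build_validation_py entries) := by unfold Pre_build_validation_py; infer_instance

def pvWitness_build_validation_py : (List (List (String × String))) :=
  [[("coverage_status", "COMPLETO")], [("coverage_status", "AMBIGUO"), ("x", "y")]]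

def Spec_build_validation_py (entries : List (List (String × String))) (out : List (String × Int)) : Prop := out = build_validation_py_alt entries
instance (entries : List (List (String × String))) (out : List (String × Int)) : Decidable (Spec_build_validation_py entries out) := by unfold Spec_build_validation_py; infer_instance

-- ===== CLAIM (what is proved, stated in full; the proofs are below) =====
def Claim_equal_build_validation_py : Prop := ∀ (entries : List (List (String × String))), Dom_build_validation_py entries → Pre_build_validation_py entries → Spec_build_validation_py entries (build_validation_py entries)

-- ===== LEMMAS AND PROOFS =====
-- A's loop over entries, read through getD, counts the statuses (skipping missing keys).
theorem pv_counts_getD (l : List (List (String × String))) (d : PySem.Dict String Int) (k : String) :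
    (l.foldl (fun d e =>
        match pvStatus e with
        | some s => d.insert s (d.getD s 0 + 1)
        | none => d) d).getD k 0
    = d.getD k 0 + ((l.filterMap pvStatus).count k : Nat) := by
  induction l generalizing d with
  | nil => simp
  | cons e l ih =>
    simp only [List.foldl_cons, List.filterMap_cons]
    cases h : pvStatus e with
    | none => rw [ih]
    | some s =>
      rw [ih, List.count_cons, PySem.Dict.getD_insert]
      by_cases hk : k = s
      · subst hk; simp; omega
      · have hne : ¬ ((s == k) = true) := by simpa using fun hs => hk hs.symm
        simp [hne]
        exact fun h => absurd h hk

theorem pv_init_getD (k : String) (hk : k = "COMPLETO" ∨ k = "AMBIGUO" ∨ k = "VALIDACION_MANUAL" ∨ k = "FALTANTE_REAL") :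
    pvCountsInit.getD k 0 = 0 := by
  rcases hk with h | h | h | h <;> subst h <;> decide

-- on a list sorted below x, the run of x's is all of the x's: none are left after dropWhile
theorem pv_not_mem_dropWhile (x : String) :
    ∀ (xs : List String), (x :: xs).Pairwise (· ≤ ·) →
      x ∉ xs.dropWhile (fun y => y == x) := by
  intro xs
  induction xs with
  | nil => simp
  | cons y ys ih =>
    intro hpw
    have hxy : x ≤ y := (List.pairwise_cons.mp hpw).1 y (List.mem_cons_self ..)
    have tailpw : (y :: ys).Pairwise (· ≤ ·) := (List.pairwise_cons.mp hpw).2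
    by_cases hy : (y == x) = true
    · have hyx : y = x := by simpa using hy
      subst hyx
      simp only [List.dropWhile_cons, hy, if_pos]
      exact ih (hpw.sublist ((List.sublist_cons_self y ys).cons₂ y))
    · simp only [List.dropWhile_cons, hy, Bool.false_eq_true, ite_false]
      intro hmem
      rcases List.mem_cons.mp hmem with hxe | hmem'
      · exact hy (by simp [hxe])
      · have hne : y ≠ x := by simpa using hy
        have hyz : y ≤ x := (List.pairwise_cons.mp tailpw).1 x hmem'
        exact hne (le_antisymm hyz hxy)

-- On a nondecreasing list equal values are contiguous, so B's run-length scan (which OVERWRITES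
-- the tally entry with one run's length) reads back as the count of k, or the old value if k absent.
theorem pv_groupTally_getD (k : String) :
    ∀ (n : Nat) (l : List String), l.length ≤ n → l.Pairwise (· ≤ ·) →
    ∀ (d : PySem.Dict String Int),
      (pvGroupTally l d).getD k 0
        = if k ∈ l then ((l.count k : Nat) : Int) else d.getD k 0 := by
  intro n
  induction n with
  | zero =>
    intro l hl _ d
    have : l = [] := List.eq_nil_of_length_eq_zero (Nat.le_zero.mp hl)
    subst this
    rw [pvGroupTally]
    simp
  | succ n ih =>
    intro l hl hpw d
    match l with
    | [] => rw [pvGroupTally]; simp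
    | x :: xs =>
      rw [pvGroupTally]
      have hrest_len : (xs.dropWhile (fun y => y == x)).length ≤ n := by
        have h1 := List.length_dropWhile_le (fun y => y == x) xs
        simp only [List.length_cons] at hl
        omega
      have hrest_pw : (xs.dropWhile (fun y => y == x)).Pairwise (· ≤ ·) :=
        hpw.tail.sublist (List.dropWhile_sublist _)
      have hx_notin : x ∉ xs.dropWhile (fun y => y == x) := pv_not_mem_dropWhile x xs hpw
      have hrun_mem : ∀ y ∈ xs.takeWhile (fun y => y == x), y = x := by
        intro y hy
        simpa using List.mem_takeWhile_imp hy
      have hsplit : xs.takeWhile (fun y => y == x) ++ xs.dropWhile (fun y => y == x) = xs :=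
        List.takeWhile_append_dropWhile
      rw [ih _ hrest_len hrest_pw]
      by_cases hk : k = x
      · subst hk
        rw [if_neg hx_notin, if_pos (List.mem_cons_self ..), PySem.Dict.getD_insert]
        have hcount_run : (xs.takeWhile (fun y => y == k)).count k
            = (xs.takeWhile (fun y => y == k)).length :=
          List.count_eq_length.mpr (fun b hb => by simp [hrun_mem b hb])
        have hxscnt : xs.count k = (xs.takeWhile (fun y => y == k)).length := by
          conv_lhs => rw [← hsplit]
          rw [List.count_append, hcount_run, List.count_eq_zero.mpr hx_notin]
          omega
        have hcnt : (k :: xs).count k = (xs.takeWhile (fun y => y == k)).length + 1 := by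
          rw [List.count_cons_self, hxscnt]
        simp [hcnt]
      · have hk_run : k ∉ xs.takeWhile (fun y => y == x) := fun hm => hk (hrun_mem k hm)
        have hmem_iff : k ∈ x :: xs ↔ k ∈ xs.dropWhile (fun y => y == x) := by
          simp only [List.mem_cons]
          constructor
          · rintro (rfl | hm)
            · exact absurd rfl hk
            · rw [← hsplit] at hm
              rcases List.mem_append.mp hm with h | h
              · exact absurd h hk_run
              · exact h
          · intro h
            right
            rw [← hsplit]
            exact List.mem_append_right _ h
        have hcnt : (x :: xs).count k = (xs.dropWhile (fun y => y == x)).count k := by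
          have hxscnt : xs.count k = (xs.dropWhile (fun y => y == x)).count k := by
            conv_lhs => rw [← hsplit]
            rw [List.count_append, List.count_eq_zero.mpr hk_run]
            omega
          rw [List.count_cons_of_ne (Ne.symm hk), hxscnt]
        have hgetD : (d.insert x ((((xs.takeWhile (fun y => y == x)).length : Int)) + 1)).getD k 0
            = d.getD k 0 := by
          rw [PySem.Dict.getD_insert]
          have hxk : ¬ ((x == k) = true) := by simpa using fun h => hk h.symm
          simp
          exact fun h => absurd h hk
        by_cases hm : k ∈ xs.dropWhile (fun y => y == x)
        · rw [if_pos hm, if_pos (hmem_iff.mpr hm), hcnt]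
        · rw [if_neg hm, if_neg (fun h => hm (hmem_iff.mp h)), hgetD]

-- B reads the tally of the SORTED statuses; sorting is a permutation, so each count agrees with A's.
theorem pv_alt_getD (entries : List (List (String × String))) (k : String) :
    (pvGroupTally (PySem.List.sorted (entries.filterMap pvStatus) (fun x => x) false)
        PySem.Dict.empty).getD k 0
    = (((entries.filterMap pvStatus).count k : Nat) : Int) := by
  have hperm := PySem.List.sorted_perm (entries.filterMap pvStatus) (fun x => x) false
  have hpw : (PySem.List.sorted (entries.filterMap pvStatus) (fun x => x) false).Pairwise (· ≤ ·) := by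
    simpa using PySem.List.sorted_pairwise (entries.filterMap pvStatus) (fun x => x)
  rw [pv_groupTally_getD k _ _ (le_refl _) hpw]
  by_cases hmem : k ∈ PySem.List.sorted (entries.filterMap pvStatus) (fun x => x) false
  · rw [if_pos hmem, hperm.count_eq]
  · rw [if_neg hmem]
    have hk : k ∉ entries.filterMap pvStatus :=
      fun h => hmem ((PySem.List.mem_sorted _ _ _ _).mpr h)
    rw [List.count_eq_zero.mpr hk]
    simp [PySem.Dict.empty, PySem.Dict.getD, PySem.Dict.get?]
  
-- an entry that has the key "coverage_status" yields a status
theorem pv_status_some (e : List (String × String))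
    (he : (e.any fun p => p.1 == "coverage_status") = true) :
    ∃ s, pvStatus e = some s := by
  induction e with
  | nil => simp at he
  | cons q e' ih =>
    by_cases hq : (q.1 == "coverage_status") = true
    · refine ⟨q.2, ?_⟩
      unfold pvStatus
      rw [PySem.Dict.get?_mk_cons]
      simp [hq]
    · have he' : (e'.any fun p => p.1 == "coverage_status") = true := by
        simpa [hq] using he
      rcases ih he' with ⟨s, hs⟩
      refine ⟨s, ?_⟩
      unfold pvStatus at hs ⊢
      rw [PySem.Dict.get?_mk_cons]
      simp [hq, hs]

-- under Pre_, every entry contributes a status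
theorem pv_len_filterMap (entries : List (List (String × String)))
    (hpre : Pre_build_validation_py entries) :
    (entries.filterMap pvStatus).length = entries.length := by
  induction entries with
  | nil => rfl
  | cons e l ih =>
    unfold Pre_build_validation_py at hpre ih
    simp only [List.all_cons, Bool.and_eq_true] at hpre
    rcases pv_status_some e hpre.1 with ⟨s, hs⟩
    simp only [List.filterMap_cons, hs, List.length_cons]
    rw [ih hpre.2]

-- ===== VERDICT (by name: the statement is the Claim_ definition above) =====
theorem build_validation_py_spec : Claim_equal_build_validation_py := by
  intro entries _ hpre
  unfold Spec_build_validation_py build_validation_py build_validation_py_alt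
  have hlen := pv_len_filterMap entries hpre
  have hlensort : (PySem.List.sorted (entries.filterMap pvStatus) (fun x => x) false).length
      = entries.length := by
    rw [PySem.List.length_sorted, hlen]
  simp only [pv_counts_getD, pv_init_getD _ (Or.inl rfl), pv_init_getD _ (Or.inr (Or.inl rfl)),
    pv_init_getD _ (Or.inr (Or.inr (Or.inl rfl))), pv_init_getD _ (Or.inr (Or.inr (Or.inr rfl))),
    zero_add, pv_alt_getD, hlensort]
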